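-- pv_equiv track=rewrite | github.com/sitapix/apple-text | scripts/validate_plugin.py | has_scope_sentence
-- ===== SOURCE A (Python) =====
-- def has_scope_sentence(body: str) -> bool:
--     lines = body.splitlines()
--     first_h2 = next((index for index, line in enumerate(lines) if line.startswith("## ")), len(lines))
--     scope_lines = []
--     for raw_line in lines[:first_h2]:
--         line = raw_line.strip()
--         if not line or line.startswith("#"):
--             continue
--         scope_lines.append(line)
--     return any(line.endswith((".", ":", "?")) or len(line.split()) >= 6 for line in scope_lines)
-- ===== SOURCE B (Python) =====
-- def has_scope_sentence(body: str) -> bool: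
--     # Character-level state machine per line: instead of the strip()/split()/endswith()
--     # string-method pipeline it computes the first and last non-whitespace characters
--     # and the number of whitespace-separated word runs in a single scan of the line.
--     for raw in body.splitlines():
--         if raw.startswith("## "):
--             break
--         first = None
--         last = None
--         words = 0
--         in_word = False
--         for ch in raw:
--             if ch.isspace():
--                 in_word = False
--             else:
--                 if first is None:
--                     first = ch
--                 last = ch
--                 if not in_word:
--                     words += 1
--                     in_word = True
--         if first is None or first == '#':
--             continue
--         if last in ('.', ':', '?') or words >= 6:
--             return True
--     return False
-- ===== Notes on version B (the rewrite author's own statement) =====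
-- stated objective: alternative
-- what changed: Replaced the strip()/split()/endswith() string-method pipeline over staged lists with a per-line character-level state machine that computes the first and last non-whitespace characters and the word-run count in one scan, short-circuiting at the first H2 heading or sentence-like line.
import Mathlib
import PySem

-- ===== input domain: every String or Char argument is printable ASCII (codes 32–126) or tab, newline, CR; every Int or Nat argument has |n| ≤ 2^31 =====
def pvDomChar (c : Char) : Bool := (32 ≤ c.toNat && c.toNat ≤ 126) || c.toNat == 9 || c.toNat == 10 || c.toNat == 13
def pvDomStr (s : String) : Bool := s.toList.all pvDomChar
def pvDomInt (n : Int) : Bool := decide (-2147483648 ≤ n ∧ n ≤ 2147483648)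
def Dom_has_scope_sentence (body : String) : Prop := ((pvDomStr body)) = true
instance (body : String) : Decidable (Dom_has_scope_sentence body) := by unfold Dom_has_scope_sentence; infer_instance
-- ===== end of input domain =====

-- B replaces A's strip()/split()/endswith() string-method pipeline with a per-line
-- character-level state machine (first/last non-whitespace char and word-run count
-- in one scan); alternative decomposition, same asymptotic cost.

-- ===== PORT A =====
-- next((index for index, line in enumerate(lines) if line.startswith("## ")), len(lines))
def pvFirstH2 : List String → Nat
  | [] => 0
  | l :: ls => if PySem.Str.startswith l "## " then 0 else 1 + pvFirstH2 ls

def has_scope_sentence (body : String) : Bool :=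
  let lines := PySem.Str.splitlines body
  let first_h2 : Nat := pvFirstH2 lines
  let scope_lines := (PySem.List.slice lines none (some (first_h2 : Int))).foldl
    (fun acc raw_line =>
      let line := PySem.Str.strip raw_line
      if line = "" || PySem.Str.startswith line "#" then acc else acc ++ [line]) []
  scope_lines.any (fun line =>
    PySem.Str.endswith line "." || PySem.Str.endswith line ":" || PySem.Str.endswith line "?"
      || decide (6 ≤ (PySem.Str.split₀ line).length))

-- ===== PORT B =====
-- the inner 'for ch in raw' loop: state (first, last, words, in_word)
def pvClassify : List Char → Option Char → Option Char → Nat → Bool → Option Char × Option Char × Nat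
  | [], first, last, words, _ => (first, last, words)
  | c :: cs, first, last, words, inW =>
    if PySem.Chars.isspace c then pvClassify cs first last words false
    else pvClassify cs (if first.isNone then some c else first) (some c)
           (if inW then words else words + 1) true

-- the outer 'for raw in body.splitlines()' loop with break / continue / return True
def pvScanB : List String → Bool
  | [] => false
  | raw :: rest =>
    if PySem.Str.startswith raw "## " then false
    else
      let res := pvClassify raw.toList none none 0 false
      if res.1 == none || res.1 == some '#' then pvScanB rest
      else if res.2.1 == some '.' || res.2.1 == some ':' || res.2.1 == some '?'
              || decide (6 ≤ res.2.2) then true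
      else pvScanB rest

def has_scope_sentence_alt (body : String) : Bool :=
  pvScanB (PySem.Str.splitlines body)

-- ===== PRECONDITION & SPEC =====
def Spec_has_scope_sentence (body : String) (out : Bool) : Prop := out = has_scope_sentence_alt body
instance (body : String) (out : Bool) : Decidable (Spec_has_scope_sentence body out) := by unfold Spec_has_scope_sentence; infer_instance

-- ===== CLAIM (what is proved, stated in full; the proofs are below) =====
def Claim_equal_has_scope_sentence : Prop := ∀ (body : String), Dom_has_scope_sentence body → Spec_has_scope_sentence body (has_scope_sentence body)

-- ===== LEMMAS AND PROOFS =====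

-- A's semantics fused into one scan over the lines (proof intermediate)
def pvScanA : List String → Bool
  | [] => false
  | raw :: rest =>
    if PySem.Str.startswith raw "## " then false
    else
      let line := PySem.Str.strip raw
      if line = "" || PySem.Str.startswith line "#" then pvScanA rest
      else if PySem.Str.endswith line "." || PySem.Str.endswith line ":"
              || PySem.Str.endswith line "?" || decide (6 ≤ (PySem.Str.split₀ line).length) then
        true
      else pvScanA rest

def pvStep (acc : List String) (raw_line : String) : List String :=
  let line := PySem.Str.strip raw_line
  if line = "" || PySem.Str.startswith line "#" then acc else acc ++ [line]

lemma pvFoldl_acc (xs : List String) (acc : List String) :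
    xs.foldl pvStep acc = acc ++ xs.foldl pvStep [] := by
  induction xs generalizing acc with
  | nil => simp
  | cons x xs ih =>
    simp only [List.foldl_cons]
    rw [ih (pvStep acc x), ih (pvStep [] x)]
    by_cases h : (decide (PySem.Str.strip x = "") || PySem.Str.startswith (PySem.Str.strip x) "#") = true
    · simp only [pvStep, h, if_true, List.nil_append]
    · simp only [pvStep, h, Bool.false_eq_true, if_false, List.nil_append, List.append_assoc]

lemma pvMainA (lines : List String) :
    ((lines.take (pvFirstH2 lines)).foldl pvStep []).any (fun line =>
      PySem.Str.endswith line "." || PySem.Str.endswith line ":" || PySem.Str.endswith line "?"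
        || decide (6 ≤ (PySem.Str.split₀ line).length)) = pvScanA lines := by
  induction lines with
  | nil => rfl
  | cons l ls ih =>
    simp only [pvFirstH2, pvScanA]
    by_cases h2 : PySem.Str.startswith l "## " = true
    · simp only [h2, if_true, List.take_zero, List.foldl_nil, List.any_nil]
    · rw [Bool.not_eq_true] at h2
      simp only [h2, Bool.false_eq_true, if_false]
      rw [Nat.add_comm 1, List.take_succ_cons, List.foldl_cons, pvFoldl_acc]
      by_cases hskip : (decide (PySem.Str.strip l = "") || PySem.Str.startswith (PySem.Str.strip l) "#") = true
      · simp only [pvStep, hskip, if_true, List.nil_append, ih]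
      · rw [Bool.not_eq_true] at hskip
        by_cases hsent : (PySem.Str.endswith (PySem.Str.strip l) "." || PySem.Str.endswith (PySem.Str.strip l) ":"
              || PySem.Str.endswith (PySem.Str.strip l) "?"
              || decide (6 ≤ (PySem.Str.split₀ (PySem.Str.strip l)).length)) = true
        · simp only [pvStep, hskip, Bool.false_eq_true, if_false, List.nil_append, List.any_append,
            List.any_cons, List.any_nil, hsent, Bool.true_or, Bool.or_false, if_true]
        · rw [Bool.not_eq_true] at hsent
          simp only [pvStep, hskip, Bool.false_eq_true, if_false, List.nil_append, List.any_append,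
            List.any_cons, List.any_nil, hsent, Bool.false_or, Bool.or_false, ih]

-- the non-whitespace characters of a line
def pvF (l : List Char) : List Char := l.filter (fun c => !PySem.Chars.isspace c)

-- number of maximal non-whitespace runs, counted at word START (B's counter)
def pvW : List Char → Bool → Nat
  | [], _ => 0
  | c :: cs, inW =>
    if PySem.Chars.isspace c then pvW cs false
    else (if inW then 0 else 1) + pvW cs true

-- number of maximal non-whitespace runs, counted at word END (split₀.go's counter)
def pvV : List Char → Bool → Nat
  | [], inW => if inW then 1 else 0
  | c :: cs, inW =>
    if PySem.Chars.isspace c then (if inW then 1 else 0) + pvV cs false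
    else pvV cs true

lemma pvClassify_spec (cs : List Char) (first last : Option Char) (words : Nat) (inW : Bool) :
    pvClassify cs first last words inW =
      ((if first.isNone then (pvF cs).head? else first),
       (if pvF cs = [] then last else (pvF cs).getLast?),
       words + pvW cs inW) := by
  induction cs generalizing first last words inW with
  | nil => cases first <;> simp [pvClassify, pvF, pvW]
  | cons c cs ih =>
    by_cases hc : PySem.Chars.isspace c = true
    · simp only [pvClassify, hc, if_true, ih, pvF, List.filter_cons, Bool.not_eq_eq_eq_not,
        Bool.not_true, pvW]
      simp [hc]
    · rw [Bool.not_eq_true] at hc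
      have hF : pvF (c :: cs) = c :: pvF cs := by simp [pvF, List.filter_cons, hc]
      simp only [pvClassify, hc, Bool.false_eq_true, if_false, ih, hF, pvW]
      refine Prod.ext ?_ (Prod.ext ?_ ?_)
      · cases first <;> simp
      · rcases h0 : pvF cs with _ | ⟨d, u⟩ <;> simp [h0, List.getLast?_cons_cons]
      · simp only []
        cases inW <;> simp <;> omega

lemma pvHead?_dropWhile (p : Char → Bool) (l : List Char) :
    (l.dropWhile p).head? = (l.filter (fun x => !p x)).head? := by
  induction l with
  | nil => rfl
  | cons x l ih =>
    by_cases hx : p x = true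
    · simp [List.dropWhile_cons, List.filter_cons, hx, ih]
    · rw [Bool.not_eq_true] at hx
      simp [List.dropWhile_cons, List.filter_cons, hx]

lemma pvFilter_dropWhile (p : Char → Bool) (l : List Char) :
    (l.dropWhile p).filter (fun x => !p x) = l.filter (fun x => !p x) := by
  induction l with
  | nil => rfl
  | cons x l ih =>
    by_cases hx : p x = true
    · simp [List.dropWhile_cons, List.filter_cons, hx, ih]
    · rw [Bool.not_eq_true] at hx
      simp [List.dropWhile_cons, List.filter_cons, hx]

lemma pvF_lstrip (l : List Char) : pvF (PySem.Chars.lstrip l) = pvF l := by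
  simp only [PySem.Chars.lstrip, pvF]
  exact pvFilter_dropWhile _ l

lemma pvF_rstrip (l : List Char) : pvF (PySem.Chars.rstrip l) = pvF l := by
  simp only [PySem.Chars.rstrip, pvF]
  rw [List.filter_reverse, pvFilter_dropWhile, List.filter_reverse, List.reverse_reverse]

lemma pvF_strip (l : List Char) : pvF (PySem.Chars.strip l) = pvF l := by
  rw [PySem.Chars.strip, pvF_rstrip, pvF_lstrip]

lemma pvStrip_eq_nil_iff (l : List Char) : PySem.Chars.strip l = [] ↔ pvF l = [] := by
  constructor
  · intro h
    have := pvF_strip l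
    rw [h] at this
    simpa [pvF] using this.symm
  · intro h
    have hall : ∀ x ∈ l, PySem.Chars.isspace x = true := by
      intro x hx
      by_contra hc
      rw [Bool.not_eq_true] at hc
      have : x ∈ pvF l := by simp [pvF, List.mem_filter, hx, hc]
      simp [h] at this
    have h1 : PySem.Chars.lstrip l = [] := by
      simp only [PySem.Chars.lstrip, List.dropWhile_eq_nil_iff]
      exact hall
    simp [PySem.Chars.strip, h1, PySem.Chars.rstrip]

lemma pvRstrip_cons (c : Char) (t : List Char) (hc : PySem.Chars.isspace c = false) :
    PySem.Chars.rstrip (c :: t) = c :: PySem.Chars.rstrip t := by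
  simp only [PySem.Chars.rstrip, List.reverse_cons, List.dropWhile_append]
  by_cases h : (t.reverse.dropWhile PySem.Chars.isspace).isEmpty = true
  · simp only [h, if_true]
    rw [List.isEmpty_iff] at h
    simp [List.dropWhile_cons, hc, h]
  · simp only [h, Bool.false_eq_true, if_false, List.reverse_append, List.reverse_cons,
      List.reverse_nil, List.nil_append, List.cons_append, List.nil_append]

lemma pvHead?_strip (l : List Char) : (PySem.Chars.strip l).head? = (pvF l).head? := by
  rcases hF : pvF l with _ | ⟨c, t⟩
  · simp [(pvStrip_eq_nil_iff l).mpr hF, hF]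
  · -- pvF l nonempty: lstrip l starts with a non-whitespace char, which heads both sides
    rcases hd : PySem.Chars.lstrip l with _ | ⟨c', t'⟩
    · exfalso
      have h0 : pvF l = [] := by rw [← pvF_lstrip l, hd]; rfl
      rw [hF] at h0
      simp at h0
    · have hc' : PySem.Chars.isspace c' = false := by
        have hd' : l.dropWhile PySem.Chars.isspace = c' :: t' := by
          simpa [PySem.Chars.lstrip] using hd
        have h2 : l.dropWhile PySem.Chars.isspace ≠ [] := by simp [hd']
        have := List.head_dropWhile_not PySem.Chars.isspace h2
        simpa [hd'] using this
      have hstrip : PySem.Chars.strip l = c' :: PySem.Chars.rstrip t' := by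
        rw [PySem.Chars.strip, hd, pvRstrip_cons c' t' hc']
      have hFl : pvF l = c' :: pvF t' := by
        rw [← pvF_lstrip l, hd]
        simp [pvF, List.filter_cons, hc']
      rw [hF] at hFl
      have hcc : c = c' := (List.cons.inj hFl).1
      rw [hstrip]
      simp [hcc]

lemma pvGetLast?_strip (l : List Char) : (PySem.Chars.strip l).getLast? = (pvF l).getLast? := by
  rw [← List.head?_reverse, ← List.head?_reverse]
  have h1 : (PySem.Chars.strip l).reverse
      = (PySem.Chars.lstrip l).reverse.dropWhile PySem.Chars.isspace := by
    simp [PySem.Chars.strip, PySem.Chars.rstrip]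
  rw [h1, pvHead?_dropWhile]
  have h2 : (PySem.Chars.lstrip l).reverse.filter (fun x => !PySem.Chars.isspace x)
      = (pvF l).reverse := by
    rw [List.filter_reverse]
    congr 1
    exact pvF_lstrip l
  rw [h2]

lemma pvStartswith_singleton (l : List Char) (a : Char) :
    PySem.Chars.startswith l [a] = true ↔ l.head? = some a := by
  cases l with
  | nil => simp [PySem.Chars.startswith, List.isPrefixOf]
  | cons b t =>
    simp only [PySem.Chars.startswith, List.isPrefixOf, Bool.and_true, List.head?_cons,
      Option.some.injEq, beq_iff_eq]
    exact eq_comm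

lemma pvEndswith_singleton (l : List Char) (a : Char) :
    PySem.Chars.endswith l [a] = true ↔ l.getLast? = some a := by
  have : PySem.Chars.endswith l [a] = PySem.Chars.startswith l.reverse [a] := by
    simp [PySem.Chars.endswith, PySem.Chars.startswith, List.isSuffixOf]
  rw [this, pvStartswith_singleton, List.head?_reverse]

lemma pvGo_all_ws (ys : List Char) (h : ∀ y ∈ ys, PySem.Chars.isspace y = true) :
    ∀ cur acc, PySem.Chars.split₀.go ys cur acc = PySem.Chars.split₀.go [] cur acc := by
  induction ys with
  | nil => intro cur acc; rfl
  | cons y ys ih =>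
    intro cur acc
    have hy : PySem.Chars.isspace y = true := h y (by simp)
    have h' : ∀ y ∈ ys, PySem.Chars.isspace y = true := fun z hz => h z (by simp [hz])
    by_cases hcur : cur.isEmpty = true
    · rw [List.isEmpty_iff] at hcur
      subst hcur
      simp only [PySem.Chars.split₀.go, hy, if_true, List.isEmpty_nil, ih h']
    · simp only [PySem.Chars.split₀.go, hy, if_true, hcur, Bool.false_eq_true, if_false,
        ih h' [] (cur.reverse :: acc)]
      simp [PySem.Chars.split₀.go, hcur]

lemma pvGo_append_ws (xs ys : List Char) (h : ∀ y ∈ ys, PySem.Chars.isspace y = true) :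
    ∀ cur acc, PySem.Chars.split₀.go (xs ++ ys) cur acc = PySem.Chars.split₀.go xs cur acc := by
  induction xs with
  | nil =>
    intro cur acc
    simpa using pvGo_all_ws ys h cur acc
  | cons x xs ih =>
    intro cur acc
    by_cases hx : PySem.Chars.isspace x = true
    · by_cases hcur : cur.isEmpty = true <;>
        simp only [List.cons_append, PySem.Chars.split₀.go, hx, if_true, hcur, if_false,
          Bool.false_eq_true, ih]
    · rw [Bool.not_eq_true] at hx
      simp only [List.cons_append, PySem.Chars.split₀.go, hx, Bool.false_eq_true, if_false, ih]

lemma pvGo_lstrip (l : List Char) (acc : List (List Char)) :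
    PySem.Chars.split₀.go (l.dropWhile PySem.Chars.isspace) [] acc
      = PySem.Chars.split₀.go l [] acc := by
  induction l with
  | nil => rfl
  | cons c t ih =>
    by_cases hc : PySem.Chars.isspace c = true
    · simp only [List.dropWhile_cons, hc, if_true, ih]
      simp [PySem.Chars.split₀.go, hc]
    · rw [Bool.not_eq_true] at hc
      simp [List.dropWhile_cons, hc]

lemma pvSplit₀_strip (l : List Char) :
    PySem.Chars.split₀ (PySem.Chars.strip l) = PySem.Chars.split₀ l := by
  have hr : ∀ x : List Char, PySem.Chars.split₀ (PySem.Chars.rstrip x) = PySem.Chars.split₀ x := by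
    intro x
    have hx : x = PySem.Chars.rstrip x ++ (x.reverse.takeWhile PySem.Chars.isspace).reverse := by
      simp only [PySem.Chars.rstrip]
      rw [← List.reverse_append, List.takeWhile_append_dropWhile, List.reverse_reverse]
    conv_rhs => rw [hx]
    simp only [PySem.Chars.split₀]
    rw [pvGo_append_ws]
    intro y hy
    rw [List.mem_reverse] at hy
    exact List.mem_takeWhile_imp hy
  rw [PySem.Chars.strip, hr]
  simp only [PySem.Chars.split₀, PySem.Chars.lstrip]
  exact pvGo_lstrip l []

lemma pvGo_length (cs : List Char) :
    ∀ cur acc, (PySem.Chars.split₀.go cs cur acc).length = acc.length + pvV cs !cur.isEmpty := by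
  induction cs with
  | nil =>
    intro cur acc
    by_cases hcur : cur.isEmpty = true <;> simp [PySem.Chars.split₀.go, hcur, pvV]
  | cons c cs ih =>
    intro cur acc
    by_cases hc : PySem.Chars.isspace c = true
    · by_cases hcur : cur.isEmpty = true <;>
        simp [PySem.Chars.split₀.go, hc, hcur, ih, pvV] <;> omega
    · rw [Bool.not_eq_true] at hc
      simp [PySem.Chars.split₀.go, hc, ih, pvV]

lemma pvV_eq_pvW (cs : List Char) : ∀ b, pvV cs b = pvW cs b + (if b then 1 else 0) := by
  induction cs with
  | nil => intro b; simp [pvV, pvW]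
  | cons c cs ih =>
    intro b
    by_cases hc : PySem.Chars.isspace c = true
    · simp [pvV, pvW, hc, ih false]
      cases b <;> simp <;> omega
    · rw [Bool.not_eq_true] at hc
      simp [pvV, pvW, hc, ih true]
      cases b <;> simp <;> omega

lemma pvLength_split₀ (l : List Char) : (PySem.Chars.split₀ l).length = pvW l false := by
  simp only [PySem.Chars.split₀]
  rw [pvGo_length l [] []]
  simp [pvV_eq_pvW]

-- the per-line equivalence wrapped into the scan over the lines
lemma pvScanA_eq_pvScanB (lines : List String) : pvScanA lines = pvScanB lines := by
  induction lines with
  | nil => rfl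
  | cons s rest ih =>
    simp only [pvScanA, pvScanB]
    by_cases h2 : PySem.Str.startswith s "## " = true
    · rw [if_pos h2, if_pos h2]
    · rw [if_neg h2, if_neg h2]
      have hstripL : (PySem.Str.strip s).toList = PySem.Chars.strip s.toList := by
        simp [PySem.Str.strip]
      have hempty : (PySem.Str.strip s = "") ↔ (PySem.Chars.strip s.toList = []) := by
        rw [← String.toList_eq_nil_iff, hstripL]
      rcases hF : pvF s.toList with _ | ⟨c, t⟩
      · -- blank (all-whitespace) line: both sides skip it
        have hnil : PySem.Str.strip s = "" := hempty.mpr ((pvStrip_eq_nil_iff s.toList).mpr hF)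
        simp only [pvClassify_spec s.toList none none 0 false, Option.isNone_none, if_true, hF,
          List.head?_nil]
        rw [if_pos (by simp [hnil]), if_pos (by simp)]
        exact ih
      · have hhead : (PySem.Chars.strip s.toList).head? = some c := by
          rw [pvHead?_strip, hF]; rfl
        have hne : ¬ (PySem.Str.strip s = "") := by
          rw [hempty]
          intro h
          rw [h] at hhead
          simp at hhead
        have hsw : PySem.Str.startswith (PySem.Str.strip s) "#" = decide (c = '#') := by
          have hb : PySem.Str.startswith (PySem.Str.strip s) "#"
              = PySem.Chars.startswith (PySem.Chars.strip s.toList) ['#'] := by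
            rw [PySem.Str.startswith_eq, hstripL, show ("#" : String).toList = ['#'] by decide]
          rw [hb]
          by_cases hc : c = '#'
          · subst hc
            simp [(pvStartswith_singleton _ _).mpr hhead]
          · simp only [hc, decide_false]
            rw [Bool.eq_false_iff]
            intro h
            have := (pvStartswith_singleton _ _).mp h
            rw [hhead] at this
            exact hc (by injection this)
        have hlast : (PySem.Chars.strip s.toList).getLast? = (c :: t).getLast? := by
          rw [pvGetLast?_strip, hF]
        have hsent : ∀ (a : Char) (p : String), p.toList = [a] →
            PySem.Str.endswith (PySem.Str.strip s) p = ((c :: t).getLast? == some a) := by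
          intro a p hp
          rw [PySem.Str.endswith_eq, hstripL, hp]
          by_cases hg : (c :: t).getLast? = some a
          · rw [(pvEndswith_singleton _ _).mpr (hlast.trans hg), hg]
            simp
          · rw [beq_eq_false_iff_ne.mpr hg, Bool.eq_false_iff]
            intro h
            exact hg (hlast.symm.trans ((pvEndswith_singleton _ _).mp h))
        have hlen : (PySem.Str.split₀ (PySem.Str.strip s)).length = pvW s.toList false := by
          simp only [PySem.Str.split₀, List.length_map, hstripL, pvSplit₀_strip, pvLength_split₀]
        simp only [pvClassify_spec s.toList none none 0 false, Option.isNone_none, if_true, hF,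
          List.head?_cons, Nat.zero_add]
        by_cases hc : c = '#'
        · -- comment line: both sides skip it
          subst hc
          rw [if_pos (by rw [hsw]; simp), if_pos (by simp)]
          exact ih
        · rw [if_neg (show ¬ ((decide (PySem.Str.strip s = "")
              || PySem.Str.startswith (PySem.Str.strip s) "#") = true) from by
                rw [hsw]; simp [hne, hc])]
          rw [if_neg (show ¬ ((some c == (none : Option Char) || some c == some '#') = true) from by
            simp [hc])]
          rw [hsent '.' "." (by decide), hsent ':' ":" (by decide), hsent '?' "?" (by decide),
            hlen, ih]
          simp only [if_neg (List.cons_ne_nil c t)]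

-- ===== VERDICT (by name: the statement is the Claim_ definition above) =====
theorem has_scope_sentence_spec : Claim_equal_has_scope_sentence := by
  intro body _
  unfold Spec_has_scope_sentence has_scope_sentence has_scope_sentence_alt
  simp only [PySem.List.slice_to_natCast]
  have h1 := pvMainA (PySem.Str.splitlines body)
  rw [pvScanA_eq_pvScanB] at h1
  exact h1
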